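-- pv_equiv track=rewrite | github.com/Gooogr/Practicum_Algos | Sprint_8/train/G_string_pattern.py | get_start_idx
-- ===== SOURCE A (Python) =====
-- from typing import Tuple, List
--
-- def _is_pattern(sub_nums: List[int], min_pattern: List[int]):
--     assert len(sub_nums) == len(min_pattern)
--     # Exlude constant from pattern [1, 3, 5] -> [0 ,2, 4]
--     sub_nums_min = min(sub_nums)
--     sub_nums = [val - sub_nums_min for val in sub_nums]
--     return sub_nums == min_pattern
--
-- def get_start_idx(nums: List[int], pattern: List[int]):
--     min_pattern_value = min(pattern)
--     pattern_min = [val - min_pattern_value for val in pattern]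
--
--     result_idxs = []
--     for idx in range(len(nums) - len(pattern_min) + 1):
--         sub_nums = nums[idx:idx + len(pattern_min)]
--         if _is_pattern(sub_nums, pattern_min):
--             result_idxs.append(idx + 1) # count from 1 by task description
--     return result_idxs
-- ===== SOURCE B (Python) =====
-- from typing import List
--
-- def get_start_idx(nums: List[int], pattern: List[int]):
--     # A window matches the min-normalized pattern iff it is the pattern shifted
--     # by a constant, i.e. iff their consecutive-difference arrays are equal.
--     if len(pattern) == 1:
--         return list(range(1, len(nums) + 1))
--     dn = [b - a for a, b in zip(nums, nums[1:])]
--     dp = [b - a for a, b in zip(pattern, pattern[1:])]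
--     k = len(dp)
--     return [i + 1 for i in range(len(dn) - k + 1) if dn[i:i + k] == dp]
-- ===== Notes on version B (the rewrite author's own statement) =====
-- stated objective: alternative
-- what changed: Instead of re-normalizing every window by its min and rebuilding a list per window, B precomputes the consecutive-difference arrays of nums and pattern once and emits i+1 whenever a slice of the difference array equals the pattern's difference array (a window matches the min-normalized pattern iff the windows' difference arrays are equal).
import Mathlib
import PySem

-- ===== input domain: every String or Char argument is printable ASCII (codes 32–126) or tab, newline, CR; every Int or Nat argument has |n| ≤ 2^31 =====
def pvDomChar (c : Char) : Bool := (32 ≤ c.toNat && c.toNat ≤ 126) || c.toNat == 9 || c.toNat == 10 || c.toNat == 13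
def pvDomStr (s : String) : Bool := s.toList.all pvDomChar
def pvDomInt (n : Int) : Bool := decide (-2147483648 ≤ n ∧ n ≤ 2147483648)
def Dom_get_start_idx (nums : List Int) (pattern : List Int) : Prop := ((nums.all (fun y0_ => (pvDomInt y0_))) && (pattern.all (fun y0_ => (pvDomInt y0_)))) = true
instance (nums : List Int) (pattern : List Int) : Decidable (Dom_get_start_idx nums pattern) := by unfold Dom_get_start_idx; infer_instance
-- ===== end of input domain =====

-- B replaces A's per-window min-normalization by one precomputed consecutive-difference
-- array per list and a slice comparison per window (alternative algorithm, same cost).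


-- ===== PORT A =====
-- _is_pattern; the Python assert always holds at its only call site (the slice has
-- pattern's length there), so it is ported as a no-op.
def pvIsPattern (sub_nums : List Int) (min_pattern : List Int) : Bool :=
  let sub_nums_min := (PySem.List.min? sub_nums (fun x => x)).getD 0
  (sub_nums.map (fun val => val - sub_nums_min)) == min_pattern

def get_start_idx (nums : List Int) (pattern : List Int) : List Int :=
  -- min(pattern) raises ValueError on empty pattern: excluded by Pre_ (getD 0 is never used inside Pre_)
  let min_pattern_value := (PySem.List.min? pattern (fun x => x)).getD 0
  let pattern_min := pattern.map (fun val => val - min_pattern_value)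
  (PySem.List.pyRange 0 ((nums.length : Int) - (pattern_min.length : Int) + 1) 1).foldl
    (fun result_idxs idx =>
      let sub_nums := PySem.List.slice nums (some idx) (some (idx + (pattern_min.length : Int)))
      if pvIsPattern sub_nums pattern_min then result_idxs ++ [idx + 1] else result_idxs)
    []

-- ===== PORT B =====
-- [b - a for a, b in zip(xs, xs[1:])]
def pvNdiff (xs : List Int) : List Int := (xs.zip xs.tail).map (fun p => p.2 - p.1)

def get_start_idx_alt (nums : List Int) (pattern : List Int) : List Int :=
  if pattern.length = 1 then
    PySem.List.pyRange 1 ((nums.length : Int) + 1) 1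
  else
    let dn := pvNdiff nums
    let dp := pvNdiff pattern
    let k := dp.length
    ((PySem.List.pyRange 0 ((dn.length : Int) - (k : Int) + 1) 1).filter
      (fun i => PySem.List.slice dn (some i) (some (i + (k : Int))) == dp)).map (fun i => i + 1)

-- ===== PRECONDITION & SPEC =====
-- Pre_ excludes only the empty pattern, on which A raises ValueError (min of empty sequence).
def Pre_get_start_idx (nums : List Int) (pattern : List Int) : Prop := pattern ≠ []
instance (nums : List Int) (pattern : List Int) : Decidable (Pre_get_start_idx nums pattern) := by unfold Pre_get_start_idx; infer_instance
def pvWitness_get_start_idx : List Int × List Int := ([1, 2, 3, 2, 3, 4, 5], [1, 2, 3])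

def Spec_get_start_idx (nums : List Int) (pattern : List Int) (out : List Int) : Prop := out = get_start_idx_alt nums pattern
instance (nums : List Int) (pattern : List Int) (out : List Int) : Decidable (Spec_get_start_idx nums pattern out) := by unfold Spec_get_start_idx; infer_instance

-- ===== CLAIM (what is proved, stated in full; the proofs are below) =====
def Claim_equal_get_start_idx : Prop := ∀ (nums : List Int) (pattern : List Int), Dom_get_start_idx nums pattern → Pre_get_start_idx nums pattern → Spec_get_start_idx nums pattern (get_start_idx nums pattern)

-- ===== LEMMAS AND PROOFS =====

theorem ndiff_cons (a b : Int) (t : List Int) :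
    pvNdiff (a :: b :: t) = (b - a) :: pvNdiff (b :: t) := rfl

theorem ndiff_length (xs : List Int) : (pvNdiff xs).length = xs.length - 1 := by
  simp [pvNdiff]

theorem ndiff_take : ∀ (xs : List Int) (m : Nat), pvNdiff (xs.take m) = (pvNdiff xs).take (m - 1)
  | [], m => by simp [pvNdiff]
  | [a], m => by cases m <;> simp [pvNdiff]
  | a :: b :: t, 0 => by simp [pvNdiff]
  | a :: b :: t, 1 => by simp [pvNdiff]
  | a :: b :: t, (m + 2) => by
      have ih := ndiff_take (b :: t) (m + 1)
      simpa [ndiff_cons] using ih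

theorem ndiff_drop : ∀ (xs : List Int) (i : Nat), pvNdiff (xs.drop i) = (pvNdiff xs).drop i
  | xs, 0 => by simp
  | [], (i + 1) => by simp [pvNdiff]
  | [a], (i + 1) => by simp [pvNdiff]
  | a :: b :: t, (i + 1) => by
      have ih := ndiff_drop (b :: t) i
      simpa [ndiff_cons] using ih

theorem ndiff_map_add : ∀ (xs : List Int) (c : Int), pvNdiff (xs.map (fun v => v + c)) = pvNdiff xs
  | [], c => rfl
  | [a], c => rfl
  | a :: b :: t, c => by
      have ih := ndiff_map_add (b :: t) c
      simp only [List.map_cons] at ih ⊢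
      rw [ndiff_cons, ndiff_cons, ih]
      congr 1
      ring

theorem shift_of_norm : ∀ (sub pat : List Int) (a b : Int),
    sub.map (fun v => v - a) = pat.map (fun v => v - b) →
    sub = pat.map (fun v => v + (a - b))
  | [], pat, a, b, h => by cases pat <;> simp_all
  | x :: t, [], a, b, h => by simp at h
  | x :: t, y :: s, a, b, h => by
      simp only [List.map_cons, List.cons.injEq] at h ⊢
      exact ⟨by omega, shift_of_norm t s a b h.2⟩

theorem shift_of_ndiff : ∀ (t s : List Int) (x y : Int),
    t.length = s.length → pvNdiff (x :: t) = pvNdiff (y :: s) →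
    x :: t = (y :: s).map (fun v => v + (x - y))
  | [], [], x, y, _, _ => by simp
  | [], _ :: _, _, _, hl, _ => by simp at hl
  | _ :: _, [], _, _, hl, _ => by simp at hl
  | x2 :: t', y2 :: s', x, y, hl, hd => by
      rw [ndiff_cons, ndiff_cons] at hd
      simp only [List.cons.injEq] at hd
      have hl' : t'.length = s'.length := by simpa using hl
      have ih := shift_of_ndiff t' s' x2 y2 hl' hd.2
      have hc : x - y = x2 - y2 := by omega
      simp only [List.map_cons, List.cons.injEq]
      refine ⟨by omega, ?_⟩
      rw [hc]
      simpa using ih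

theorem foldl_min_map_add : ∀ (s : List Int) (x c : Int),
    (s.map (fun v => v + c)).foldl min (x + c) = s.foldl min x + c
  | [], x, c => rfl
  | a :: s, x, c => by
      simp only [List.map_cons, List.foldl_cons]
      rw [min_add_add_right]
      exact foldl_min_map_add s (min x a) c

theorem minD_map_add (y : Int) (s : List Int) (c : Int) :
    (PySem.List.min? ((y :: s).map (fun v => v + c)) (fun v => v)).getD 0
      = (PySem.List.min? (y :: s) (fun v => v)).getD 0 + c := by
  simp only [List.map_cons]
  rw [PySem.List.min?_id_cons, PySem.List.min?_id_cons]
  simpa using foldl_min_map_add s y c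

theorem norm_of_shift (y : Int) (s : List Int) (c : Int) :
    ((y :: s).map (fun v => v + c)).map
        (fun v => v - (PySem.List.min? ((y :: s).map (fun v => v + c)) (fun v => v)).getD 0)
      = (y :: s).map (fun v => v - (PySem.List.min? (y :: s) (fun v => v)).getD 0) := by
  rw [minD_map_add, List.map_map]
  apply List.map_congr_left
  intro a _
  simp only [Function.comp]
  ring

theorem window_iff (sub pat : List Int) (hlen : sub.length = pat.length) (hpat : pat ≠ []) :
    (sub.map (fun v => v - (PySem.List.min? sub (fun v => v)).getD 0)
       = pat.map (fun v => v - (PySem.List.min? pat (fun v => v)).getD 0))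
      ↔ pvNdiff sub = pvNdiff pat := by
  constructor
  · intro h
    have hs := shift_of_norm sub pat _ _ h
    rw [hs, ndiff_map_add]
  · intro h
    obtain ⟨y, s, rfl⟩ := List.exists_cons_of_ne_nil hpat
    match sub, hlen with
    | x :: t, hlen =>
      have hl : t.length = s.length := by simpa using hlen
      have hs := shift_of_ndiff t s x y hl h
      rw [hs]
      exact norm_of_shift y s (x - y)

theorem map_add_one_pyRange (N : Int) :
    (PySem.List.pyRange 0 N 1).map (fun i => i + 1) = PySem.List.pyRange 1 (N + 1) 1 := by
  rw [PySem.List.pyRange_one, PySem.List.pyRange_one, List.map_map]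
  have h : N + 1 - 1 = N - 0 := by ring
  rw [h]
  apply List.map_congr_left
  intro a _
  simp [Function.comp]
  ring

theorem A_as_filter (nums pattern : List Int) (hpat : pattern ≠ []) :
    get_start_idx nums pattern =
      ((PySem.List.pyRange 0 ((nums.length : Int) - (pattern.length : Int) + 1) 1).filter
        (fun i => ((pvNdiff nums).drop i.toNat).take (pattern.length - 1) == pvNdiff pattern)).map
        (fun i => i + 1) := by
  simp only [get_start_idx, List.length_map]
  rw [PySem.List.foldl_append_if]
  rw [List.nil_append]
  congr 1
  apply List.filter_congr
  intro i hi
  rw [PySem.List.mem_pyRange_one] at hi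
  have h0 : (0:Int) ≤ i := hi.1
  have h2 : (0:Int) ≤ i + (pattern.length : Int) := by omega
  rw [PySem.List.slice_toNat nums h0 h2]
  have ht : (i + (pattern.length : Int)).toNat - i.toNat = pattern.length := by omega
  rw [ht]
  have hlen : ((nums.drop i.toNat).take pattern.length).length = pattern.length := by
    have := hi.2
    simp only [List.length_take, List.length_drop]
    omega
  rw [Bool.eq_iff_iff]
  simp only [pvIsPattern, beq_iff_eq]
  rw [window_iff _ pattern hlen hpat, ndiff_take, ndiff_drop]

-- ===== VERDICT (by name: the statement is the Claim_ definition above) =====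
theorem get_start_idx_spec : Claim_equal_get_start_idx := by
  intro nums pattern _ hpre
  unfold Spec_get_start_idx
  have hpat : pattern ≠ [] := hpre
  rw [A_as_filter nums pattern hpat]
  by_cases hm1 : pattern.length = 1
  · obtain ⟨p, hp⟩ : ∃ p, pattern = [p] := by
      cases pattern with
      | nil => simp at hm1
      | cons a t =>
        cases t with
        | nil => exact ⟨a, rfl⟩
        | cons b t => simp at hm1
    subst hp
    simp only [get_start_idx_alt, if_pos hm1]
    have hq : ∀ i ∈ PySem.List.pyRange 0 ((nums.length : Int) - (([p] : List Int).length : Int) + 1) 1,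
        ((((pvNdiff nums).drop i.toNat).take (([p] : List Int).length - 1) == pvNdiff [p]))
          = (fun _ : Int => true) i := by
      intro i _
      simp [pvNdiff]
    rw [List.filter_congr hq, List.filter_true]
    have hb : (nums.length : Int) - (([p] : List Int).length : Int) + 1 = (nums.length : Int) := by
      simp
    rw [hb]
    have := map_add_one_pyRange (nums.length : Int)
    simpa using this
  · have hm0 : pattern.length ≠ 0 := by simpa using hpat
    have hm2 : 2 ≤ pattern.length := by omega
    simp only [get_start_idx_alt, if_neg hm1]
    by_cases hn : nums = []
    · subst hn
      rw [PySem.List.pyRange_one_eq_nil (by simp; omega),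
          PySem.List.pyRange_one_eq_nil ?hb]
      · simp
      case hb =>
        simp [pvNdiff]
        omega
    · have hn1 : 1 ≤ nums.length := by
        cases nums with
        | nil => simp at hn
        | cons a t => simp
      have hb : ((pvNdiff nums).length : Int) - ((pvNdiff pattern).length : Int) + 1
          = (nums.length : Int) - (pattern.length : Int) + 1 := by
        rw [ndiff_length, ndiff_length]
        omega
      rw [hb]
      congr 1
      apply List.filter_congr
      intro i hi
      rw [PySem.List.mem_pyRange_one] at hi
      have h0 : (0:Int) ≤ i := hi.1
      have hk0 : (0:Int) ≤ i + ((pvNdiff pattern).length : Int) := by omega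
      rw [PySem.List.slice_toNat (pvNdiff nums) h0 hk0]
      have ht : (i + ((pvNdiff pattern).length : Int)).toNat - i.toNat
          = (pvNdiff pattern).length := by omega
      rw [ht, ndiff_length]
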